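-- pv_equiv track=rewrite | github.com/Amryu/Entropia-Nexus | client/ui/dialogs/inventory_import.py | _resolve_storage_location
-- ===== SOURCE A (Python) =====
-- def _resolve_storage_location(item_id, container_map: dict, visited: set) -> str | None:
--     if item_id not in container_map:
--         return None
--     if item_id in visited:
--         return None
--     visited.add(item_id)
--     entry = container_map[item_id]
--     ref = entry.get('ref')
--     if ref is None or ref not in container_map:
--         return entry.get('container')
--     return _resolve_storage_location(ref, container_map, visited)
-- ===== SOURCE B (Python) =====
-- def _resolve_storage_location(item_id, container_map: dict, visited: set) -> str | None:
--     # Phase 1: walk the ref chain, collecting the path of visited ids.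
--     path = []
--     cur = item_id
--     while cur in container_map and cur not in visited and cur not in path:
--         path.append(cur)
--         cur = container_map[cur].get('ref')
--     visited.update(path)
--     # Phase 2: decide the answer from how the walk stopped.
--     if path and cur not in container_map:
--         return container_map[path[-1]].get('container')
--     return None
-- ===== Notes on version B (the rewrite author's own statement) =====
-- stated objective: alternative
-- what changed: Replaced A's self-recursive chase of the ref chain with a two-phase algorithm: a loop that collects the whole chain into an explicit path list (cycle-checked against path itself), then a single post-hoc decision computing the result from the path and the stopping id.
import Mathlib
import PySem

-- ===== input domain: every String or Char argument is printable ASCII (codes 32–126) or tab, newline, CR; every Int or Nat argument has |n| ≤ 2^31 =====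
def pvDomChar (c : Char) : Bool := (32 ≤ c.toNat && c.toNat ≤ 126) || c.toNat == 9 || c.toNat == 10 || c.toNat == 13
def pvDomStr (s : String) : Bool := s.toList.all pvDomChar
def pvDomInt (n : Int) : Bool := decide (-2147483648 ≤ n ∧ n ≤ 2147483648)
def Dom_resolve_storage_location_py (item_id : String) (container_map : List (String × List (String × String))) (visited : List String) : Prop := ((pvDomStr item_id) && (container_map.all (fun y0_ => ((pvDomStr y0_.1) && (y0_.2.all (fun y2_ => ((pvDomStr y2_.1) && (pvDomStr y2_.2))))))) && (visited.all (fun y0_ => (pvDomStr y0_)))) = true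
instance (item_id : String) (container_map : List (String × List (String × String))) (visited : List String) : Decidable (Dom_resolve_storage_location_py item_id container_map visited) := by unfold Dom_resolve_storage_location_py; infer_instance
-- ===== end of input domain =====

-- B replaces A's self-recursion with a two-phase algorithm (collect the ref-chain path, then decide from the stopping id); equivalence is about the return value (both add the same ids to visited).


-- association-list lookup, first match (dict convention)
def pvLookup {α : Type} (m : List (String × α)) (k : String) : Option α :=
  (m.find? (fun p => p.1 == k)).map (·.2)

-- ===== PORT A =====
-- A is recursive; the fuel only bounds the recursion depth (each recursive step adds a
-- fresh key of container_map to visited, so container_map.length + 1 frames always suffice;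
-- the equivalence lemma below holds for EVERY fuel, so the bound carries no claim of its own).
def resolve_storage_location_py_loop (container_map : List (String × List (String × String))) : Nat → String → List String → Option String
  | 0, _, _ => none
  | fuel + 1, item_id, visited =>
    if (pvLookup container_map item_id).isNone then none
    else if visited.contains item_id then none
    else
      let visited' := PySem.Set.add visited item_id
      let entry := (pvLookup container_map item_id).getD []
      match pvLookup entry "ref" with
      | none => pvLookup entry "container"
      | some ref =>
        if (pvLookup container_map ref).isNone then pvLookup entry "container"
        else resolve_storage_location_py_loop container_map fuel ref visited'

def resolve_storage_location_py (item_id : String) (container_map : List (String × List (String × String))) (visited : List String) : Option String :=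
  resolve_storage_location_py_loop container_map (container_map.length + 1) item_id visited

-- ===== PORT B =====
-- Phase 1 of Source B: the while-loop collecting the chain into `path`; `cur` becomes none when
-- a ref is missing (Python None). Fuel bounds the iteration count only (same sufficiency).
def pvWalk (container_map : List (String × List (String × String))) : Nat → Option String → List String → List String → (List String × Option String)
  | 0, cur, _, path => (path, cur)
  | fuel + 1, cur, visited, path =>
    match cur with
    | none => (path, none)
    | some c =>
      if (pvLookup container_map c).isSome && !visited.contains c && !path.contains c then
        pvWalk container_map fuel (pvLookup ((pvLookup container_map c).getD []) "ref") visited (path ++ [c])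
      else (path, some c)

-- Phase 2 of Source B: `if path and cur not in container_map: return container_map[path[-1]].get('container'); return None`
def pvFinish (container_map : List (String × List (String × String))) (pr : List String × Option String) : Option String :=
  match pr.1.getLast? with
  | none => none
  | some last =>
    match pr.2 with
    | none => pvLookup ((pvLookup container_map last).getD []) "container"
    | some c =>
      if (pvLookup container_map c).isSome then none
      else pvLookup ((pvLookup container_map last).getD []) "container"

def resolve_storage_location_py_alt (item_id : String) (container_map : List (String × List (String × String))) (visited : List String) : Option String :=
  pvFinish container_map (pvWalk container_map (container_map.length + 1) (some item_id) visited [])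

-- ===== PRECONDITION & SPEC =====
def Spec_resolve_storage_location_py (item_id : String) (container_map : List (String × List (String × String))) (visited : List String) (out : Option String) : Prop := out = resolve_storage_location_py_alt item_id container_map visited
instance (item_id : String) (container_map : List (String × List (String × String))) (visited : List String) (out : Option String) : Decidable (Spec_resolve_storage_location_py item_id container_map visited out) := by unfold Spec_resolve_storage_location_py; infer_instance

-- ===== CLAIM (what is proved, stated in full; the proofs are below) =====
def Claim_equal_resolve_storage_location_py : Prop := ∀ (item_id : String) (container_map : List (String × List (String × String))) (visited : List String), Dom_resolve_storage_location_py item_id container_map visited → Spec_resolve_storage_location_py item_id container_map visited (resolve_storage_location_py item_id container_map visited)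

-- ===== LEMMAS AND PROOFS =====

-- A's growing visited set corresponds to B's fixed `visited` plus the accumulated `path`.
-- H2 reflects that B's walk only re-enters the loop head with a cur that was a live ref.
theorem walk_eq (m : List (String × List (String × String))) :
    ∀ (fuel : Nat) (c : String) (vstate visited path : List String),
      (∀ x, vstate.contains x = (visited.contains x || path.contains x)) →
      (path ≠ [] → (pvLookup m c).isSome) →
      resolve_storage_location_py_loop m fuel c vstate =
      pvFinish m (pvWalk m fuel (some c) visited path) := by
  intro fuel
  induction fuel with
  | zero =>
    intro c vstate visited path _ h2
    simp only [resolve_storage_location_py_loop, pvWalk, pvFinish]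
    cases path with
    | nil => simp
    | cons a t =>
      have := h2 (by simp)
      simp [List.getLast?, this]
  | succ n ih =>
    intro c vstate visited path h1 h2
    simp only [resolve_storage_location_py_loop, pvWalk]
    cases hm : pvLookup m c with
    | none =>
      -- A returns none; B exits immediately; path must be empty by H2
      cases path with
      | nil => simp [pvFinish]
      | cons a t => exact absurd (h2 (by simp)) (by simp [hm])
    | some entry =>
      simp only [Option.isNone_some, Option.isSome_some, Option.getD_some,
        Bool.true_and, Bool.false_eq_true, if_false]
      have h1c := h1 c
      cases hb : (visited.contains c || path.contains c) with
      | true =>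
        -- already visited (in the original set or earlier on the path): both give none
        rw [hb] at h1c
        rw [h1c]
        have hcond : (!visited.contains c && !path.contains c) = false := by
          cases hvv : visited.contains c <;> cases hp : path.contains c <;> simp_all
        rw [if_pos rfl, hcond]
        simp only [Bool.false_eq_true, if_false]
        cases path with
        | nil => simp [pvFinish]
        | cons a t =>
          have hs := h2 (by simp)
          rw [hm] at hs
          simp only [pvFinish]
          cases hl : (a :: t).getLast? with
          | none => simp at hl
          | some last => simp [hm]
      | false =>
        -- fresh node: both step
        rw [hb] at h1c
        have hvis : visited.contains c = false := by
          cases hvv : visited.contains c <;> simp_all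
        have hpth : path.contains c = false := by
          cases hp : path.contains c <;> simp_all
        rw [h1c]
        simp only [Bool.false_eq_true, if_false, hvis, hpth, Bool.not_false, Bool.and_self, if_true]
        cases hr : pvLookup entry "ref" with
        | none =>
          -- ref is None: A returns container; B's walk stops with cur = none
          have hwn : ∀ f v p, pvWalk m f none v p = (p, none) := by
            intro f v p; cases f <;> simp [pvWalk]
          rw [hwn]
          simp [pvFinish, hm]
        | some r =>
          cases hcr : pvLookup m r with
          | none =>
            -- dead ref: A returns container; B's walk stops next iteration (any fuel)
            have hwr : ∀ f v p, pvWalk m f (some r) v p = (p, some r) := by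
              intro f v p; cases f with
              | zero => simp [pvWalk]
              | succ k => simp [pvWalk, hcr]
            rw [hwr]
            simp [pvFinish, hm, hcr]
          | some e2 =>
            -- live ref: both recurse; re-establish the invariants
            simp only [hcr, Option.isNone_some, Bool.false_eq_true, if_false]
            apply ih
            · intro x
              have hx := h1 x
              simp only [PySem.Set.add]
              rw [if_neg (by simpa using h1c)]
              simp only [List.contains_append, List.contains_cons, hx, List.contains_nil,
                Bool.or_false, Bool.or_assoc]
            · intro _; simp [hcr]

-- ===== VERDICT (by name: the statement is the Claim_ definition above) =====
theorem resolve_storage_location_py_spec : Claim_equal_resolve_storage_location_py := by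
  intro item_id container_map visited _
  unfold Spec_resolve_storage_location_py resolve_storage_location_py resolve_storage_location_py_alt
  exact walk_eq container_map _ item_id visited visited [] (by simp) (by simp)
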